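-- pv_equiv track=rewrite | github.com/arango-solutions/fraud-intelligence | scripts/test_phase1.py | split_aql_queries
-- ===== SOURCE A (Python) =====
-- from typing import Dict, List, Optional, Tuple
--
-- def split_aql_queries(aql_text: str) -> List[str]:
--     lines = []
--     for line in aql_text.splitlines():
--         if line.strip().startswith("//"):
--             continue
--         lines.append(line)
--     cleaned = "\n".join(lines).strip()
--     # Split on blank lines where a new query begins with FOR
--     chunks: List[str] = []
--     buf: List[str] = []
--     for line in cleaned.splitlines():
--         if not line.strip() and buf:
--             chunk = "\n".join(buf).strip()
--             if chunk:
--                 chunks.append(chunk)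
--             buf = []
--             continue
--         buf.append(line)
--     last = "\n".join(buf).strip()
--     if last:
--         chunks.append(last)
--     # Keep chunks that contain at least one FOR-clause (may start with WITH).
--     kept: List[str] = []
--     for c in chunks:
--         if any(line.lstrip().startswith("FOR ") for line in c.splitlines()):
--             kept.append(c)
--     return kept
-- ===== SOURCE B (Python) =====
-- def split_aql_queries(aql_text):
--     cleaned = "\n".join(
--         line for line in aql_text.splitlines()
--         if not line.strip().startswith("//")
--     ).strip()
--     lines = cleaned.splitlines()
--     paragraphs = []
--     i, n = 0, len(lines)
--     while i < n:
--         if not lines[i].strip():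
--             i += 1
--             continue
--         j = i
--         while j < n and lines[j].strip():
--             j += 1
--         paragraphs.append("\n".join(lines[i:j]).strip())
--         i = j
--     return [p for p in paragraphs
--             if any(l.lstrip().startswith("FOR ") for l in p.splitlines())]
-- ===== Notes on version B (the rewrite author's own statement) =====
-- stated objective: simpler
-- what changed: Replaces A's stateful buffer-accumulator loop (with its duplicated flush logic after the loop) by a split-into-paragraphs pass: scan to each maximal run of non-blank lines, join-strip it, then filter paragraphs containing a FOR line.
import Mathlib
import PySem

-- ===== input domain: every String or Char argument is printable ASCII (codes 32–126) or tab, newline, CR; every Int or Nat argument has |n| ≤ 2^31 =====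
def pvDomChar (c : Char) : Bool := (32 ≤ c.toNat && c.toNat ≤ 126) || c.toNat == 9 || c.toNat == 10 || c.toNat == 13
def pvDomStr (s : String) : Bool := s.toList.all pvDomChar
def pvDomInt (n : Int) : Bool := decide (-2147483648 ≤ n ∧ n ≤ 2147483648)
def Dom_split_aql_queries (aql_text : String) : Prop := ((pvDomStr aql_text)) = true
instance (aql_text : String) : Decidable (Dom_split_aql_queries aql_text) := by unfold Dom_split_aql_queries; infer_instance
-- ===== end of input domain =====

-- B replaces A's stateful buffer/flush accumulation by a paragraph-splitting pass (simpler decomposition, same cost).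

-- ===== PORT A =====
-- the loop body of A's second for-loop (state = (chunks, buf))
def pvAStep (s : List String × List String) (line : String) : List String × List String :=
  if (PySem.Str.strip line == "") && !s.2.isEmpty then
    let chunk := PySem.Str.strip (PySem.Str.join "\n" s.2)
    (if chunk == "" then s.1 else s.1 ++ [chunk], [])
  else (s.1, s.2 ++ [line])

-- A's code after the loop: flush the remaining buffer
def pvAFinish (s : List String × List String) : List String :=
  let last := PySem.Str.strip (PySem.Str.join "\n" s.2)
  if last == "" then s.1 else s.1 ++ [last]

def split_aql_queries (aql_text : String) : List String :=
  let lines := (PySem.Str.splitlines aql_text).foldl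
    (fun acc line => if PySem.Str.startswith (PySem.Str.strip line) "//" then acc else acc ++ [line]) []
  let cleaned := PySem.Str.strip (PySem.Str.join "\n" lines)
  let chunks := pvAFinish ((PySem.Str.splitlines cleaned).foldl pvAStep ([], []))
  chunks.foldl
    (fun kept c =>
      if (PySem.Str.splitlines c).any (fun l => PySem.Str.startswith (PySem.Str.lstrip l) "FOR ")
      then kept ++ [c] else kept) []

-- ===== PORT B =====
-- B's while-loop: recursion over the line list; the inner `while j < n and lines[j].strip()`
-- scan is List.takeWhile/dropWhile on the non-blank predicate.
def altParas (ls : List String) : List String :=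
  match ls with
  | [] => []
  | x :: rest =>
    if PySem.Str.strip x == "" then altParas rest
    else
      PySem.Str.strip (PySem.Str.join "\n" (x :: rest.takeWhile (fun l => !(PySem.Str.strip l == "")))) ::
        altParas (rest.dropWhile (fun l => !(PySem.Str.strip l == "")))
termination_by ls.length
decreasing_by
  · simp
  · have := List.length_dropWhile_le (fun l => !(PySem.Str.strip l == "")) rest
    simp; omega

def split_aql_queries_alt (aql_text : String) : List String :=
  let cleaned := PySem.Str.strip (PySem.Str.join "\n"
    ((PySem.Str.splitlines aql_text).filter
      (fun line => !PySem.Str.startswith (PySem.Str.strip line) "//")))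
  (altParas (PySem.Str.splitlines cleaned)).filter
    (fun p => (PySem.Str.splitlines p).any (fun l => PySem.Str.startswith (PySem.Str.lstrip l) "FOR "))

-- ===== PRECONDITION & SPEC =====
def Spec_split_aql_queries (aql_text : String) (out : List String) : Prop := out = split_aql_queries_alt aql_text
instance (aql_text : String) (out : List String) : Decidable (Spec_split_aql_queries aql_text out) := by unfold Spec_split_aql_queries; infer_instance

-- ===== CLAIM (what is proved, stated in full; the proofs are below) =====
def Claim_equal_split_aql_queries : Prop := ∀ (aql_text : String), Dom_split_aql_queries aql_text → Spec_split_aql_queries aql_text (split_aql_queries aql_text)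

-- ===== LEMMAS AND PROOFS =====

-- a "drop these" foldl is a filter
theorem foldl_drop_if {α : Type} (p : α → Bool) (l : List α) (acc : List α) :
    l.foldl (fun a x => if p x then a else a ++ [x]) acc = acc ++ l.filter (fun x => !p x) := by
  induction l generalizing acc with
  | nil => simp
  | cons x t ih => cases hx : p x <;> simp [hx, ih, List.append_assoc]

-- a "keep these" foldl is a filter
theorem foldl_keep_if {α : Type} (p : α → Bool) (l : List α) (acc : List α) :
    l.foldl (fun a x => if p x then a ++ [x] else a) acc = acc ++ l.filter p := by
  induction l generalizing acc with
  | nil => simp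
  | cons x t ih => cases hx : p x <;> simp [hx, ih, List.append_assoc]

theorem strip_eq_nil_iff (l : List Char) :
    PySem.Chars.strip l = [] ↔ ∀ c ∈ l, PySem.Chars.isspace c = true := by
  unfold PySem.Chars.strip PySem.Chars.rstrip PySem.Chars.lstrip
  constructor
  · intro h c hc
    have h2 : (List.dropWhile PySem.Chars.isspace l).reverse.dropWhile PySem.Chars.isspace = [] :=
      List.reverse_eq_nil_iff.mp h
    have hdrop : ∀ x ∈ List.dropWhile PySem.Chars.isspace l, PySem.Chars.isspace x = true := by
      intro x hx
      exact List.dropWhile_eq_nil_iff.mp h2 x (by simpa using hx)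
    rcases (by rw [List.takeWhile_append_dropWhile] at *; exact hc :
        c ∈ List.takeWhile PySem.Chars.isspace l ++ List.dropWhile PySem.Chars.isspace l) with h3
    rcases List.mem_append.mp h3 with h4 | h4
    · exact List.mem_takeWhile_imp h4
    · exact hdrop c h4
  · intro h
    have : List.dropWhile PySem.Chars.isspace l = [] := List.dropWhile_eq_nil_iff.mpr h
    simp [this]

theorem ofList_eq_empty_iff (l : List Char) : (String.ofList l = "") ↔ l = [] := by
  constructor
  · intro h
    have := congrArg String.toList h
    simpa using this
  · rintro rfl; rfl

theorem strStrip_eq_empty_iff (s : String) :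
    (PySem.Str.strip s = "") ↔ ∀ c ∈ s.toList, PySem.Chars.isspace c = true := by
  unfold PySem.Str.strip
  rw [ofList_eq_empty_iff, strip_eq_nil_iff]

theorem mem_join (sep : List Char) (cs : List (List Char)) (c : List Char) (ch : Char)
    (hc : c ∈ cs) (hch : ch ∈ c) : ch ∈ PySem.Chars.join sep cs := by
  induction cs with
  | nil => cases hc
  | cons c' rest ih =>
      cases rest with
      | nil =>
          rw [PySem.Chars.join_singleton]
          rcases List.mem_cons.mp hc with rfl | h
          · exact hch
          · cases h
      | cons r rs =>
          rw [PySem.Chars.join_cons_cons]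
          rcases List.mem_cons.mp hc with rfl | h
          · exact List.mem_append.mpr (Or.inl (List.mem_append.mpr (Or.inl hch)))
          · exact List.mem_append.mpr (Or.inr (ih h))

-- Str-level: a blank line in front of the joined list disappears under strip
theorem strip_join_blank_cons (b : String) (rest : List String)
    (hb : PySem.Str.strip b = "") :
    PySem.Str.strip (PySem.Str.join "\n" (b :: rest)) = PySem.Str.strip (PySem.Str.join "\n" rest) := by
  have hball : ∀ c ∈ b.toList, PySem.Chars.isspace c = true := (strStrip_eq_empty_iff b).mp hb
  have hbdrop : List.dropWhile PySem.Chars.isspace b.toList = [] :=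
    List.dropWhile_eq_nil_iff.mpr hball
  cases rest with
  | nil =>
      have h1 : PySem.Chars.strip b.toList = [] := (strip_eq_nil_iff _).mpr hball
      show PySem.Str.strip (PySem.Str.join "\n" [b]) = PySem.Str.strip (PySem.Str.join "\n" [])
      unfold PySem.Str.join PySem.Str.strip
      simp only [List.map_cons, List.map_nil, PySem.Chars.join_singleton, PySem.Chars.join_nil,
        String.toList_ofList, h1]
      rfl
  | cons r rs =>
      unfold PySem.Str.join PySem.Str.strip
      congr 1
      simp only [List.map_cons, PySem.Chars.join_cons_cons, String.toList_ofList]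
      unfold PySem.Chars.strip PySem.Chars.lstrip
      congr 1
      rw [List.append_assoc, List.dropWhile_append]
      simp [hbdrop, show PySem.Chars.isspace '\n' = true from rfl]

theorem strip_join_blank_prefix (bs cs : List String)
    (hbs : ∀ b ∈ bs, PySem.Str.strip b = "") :
    PySem.Str.strip (PySem.Str.join "\n" (bs ++ cs)) = PySem.Str.strip (PySem.Str.join "\n" cs) := by
  induction bs with
  | nil => simp
  | cons b t ih =>
      have : PySem.Str.strip b = "" := hbs b (by simp)
      rw [List.cons_append, strip_join_blank_cons _ _ this, ih (fun x hx => hbs x (by simp [hx]))]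

-- a joined list with a non-blank member does not strip to ""
theorem strip_join_ne_empty (cs : List String) (c : String)
    (hc : c ∈ cs) (hne : ¬ PySem.Str.strip c = "") :
    ¬ PySem.Str.strip (PySem.Str.join "\n" cs) = "" := by
  intro h
  have hall := (strStrip_eq_empty_iff _).mp h
  apply hne
  apply (strStrip_eq_empty_iff c).mpr
  intro ch hch
  apply hall
  unfold PySem.Str.join
  rw [String.toList_ofList]
  exact mem_join _ _ c.toList ch (List.mem_map_of_mem hc) hch

theorem takeWhile_append_all {α : Type} (p : α → Bool) (cs L : List α)
    (h : ∀ c ∈ cs, p c = true) : (cs ++ L).takeWhile p = cs ++ L.takeWhile p := by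
  induction cs with
  | nil => simp
  | cons x t ih => simp [h x (by simp), ih (fun c hc => h c (by simp [hc]))]

theorem dropWhile_append_all {α : Type} (p : α → Bool) (cs L : List α)
    (h : ∀ c ∈ cs, p c = true) : (cs ++ L).dropWhile p = L.dropWhile p := by
  induction cs with
  | nil => simp
  | cons x t ih => simp [h x (by simp), ih (fun c hc => h c (by simp [hc]))]

-- altParas on (non-blank run ++ rest with blank-or-no head) peels exactly the run
theorem altParas_run (c : String) (cs' L : List String)
    (hcs : ∀ x ∈ c :: cs', ¬ PySem.Str.strip x = "")
    (hL : L = [] ∨ ∃ y t, L = y :: t ∧ PySem.Str.strip y = "") :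
    altParas ((c :: cs') ++ L) =
      PySem.Str.strip (PySem.Str.join "\n" (c :: cs')) :: altParas L := by
  have hc : ¬ PySem.Str.strip c = "" := hcs c (by simp)
  have hcs' : ∀ x ∈ cs', (fun l => !(PySem.Str.strip l == "")) x = true := by
    intro x hx
    simpa using hcs x (by simp [hx])
  have htw : List.takeWhile (fun l => !(PySem.Str.strip l == "")) L = [] := by
    rcases hL with rfl | ⟨y, t, rfl, hy⟩
    · rfl
    · simp [hy]
  have hdw : List.dropWhile (fun l => !(PySem.Str.strip l == "")) L = L := by
    rcases hL with rfl | ⟨y, t, rfl, hy⟩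
    · rfl
    · simp [hy]
  rw [List.cons_append, altParas]
  rw [if_neg (by simpa using hc)]
  rw [takeWhile_append_all _ _ _ hcs', dropWhile_append_all _ _ _ hcs', htw, hdw]
  simp

-- the main loop invariant: A's accumulator loop + final flush = B's paragraph recursion
theorem core (L : List String) (acc bs cs : List String)
    (hbs : ∀ b ∈ bs, PySem.Str.strip b = "")
    (hcs : ∀ c ∈ cs, ¬ PySem.Str.strip c = "") :
    pvAFinish (L.foldl pvAStep (acc, bs ++ cs)) = acc ++ altParas (cs ++ L) := by
  induction L generalizing acc bs cs with
  | nil =>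
      rw [List.foldl_nil, List.append_nil]
      unfold pvAFinish
      simp only
      rw [strip_join_blank_prefix bs cs hbs]
      cases cs with
      | nil => simp [altParas, show PySem.Str.strip (PySem.Str.join "\n" ([] : List String)) = "" from rfl]
      | cons c cs' =>
          have hne := strip_join_ne_empty (c :: cs') c (by simp) (hcs c (by simp))
          rw [if_neg (by simpa using hne)]
          rw [show (c :: cs' : List String) = (c :: cs') ++ [] from (List.append_nil _).symm,
            altParas_run c cs' [] (by simpa using hcs) (Or.inl rfl)]
          simp [altParas]
  | cons x L' ih =>
      rw [List.foldl_cons]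
      by_cases hx : PySem.Str.strip x = ""
      · by_cases hbuf : bs ++ cs = []
        · rcases List.append_eq_nil_iff.mp hbuf with ⟨rfl, rfl⟩
          have hstep : pvAStep (acc, ([] : List String) ++ []) x = (acc, [x]) := by
            unfold pvAStep; simp
          rw [hstep]
          have := ih acc [x] [] (by intro b hb; simp at hb; subst hb; exact hx) (by simp)
          simp only [List.append_nil, List.nil_append] at this ⊢
          rw [this]
          simp [altParas, hx]
        · have hcond : ((PySem.Str.strip x == "") && !(bs ++ cs).isEmpty) = true := by
            simp [hx, hbuf]
          cases cs with
          | nil =>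
              have hchunk : PySem.Str.strip (PySem.Str.join "\n" bs) = "" := by
                have := strip_join_blank_prefix bs [] hbs
                simpa using this
              have hstep : pvAStep (acc, bs ++ []) x = (acc, []) := by
                unfold pvAStep
                rw [if_pos hcond]
                simp only [List.append_nil, hchunk]
                simp
              rw [hstep]
              have := ih acc [] [] (by simp) (by simp)
              simp only [List.append_nil, List.nil_append] at this ⊢
              rw [this]
              simp [altParas, hx]
          | cons c cs' =>
              have hne := strip_join_ne_empty (c :: cs') c (by simp) (hcs c (by simp))
              have hchunk : PySem.Str.strip (PySem.Str.join "\n" (bs ++ c :: cs')) =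
                  PySem.Str.strip (PySem.Str.join "\n" (c :: cs')) :=
                strip_join_blank_prefix bs (c :: cs') hbs
              have hstep : pvAStep (acc, bs ++ c :: cs') x =
                  (acc ++ [PySem.Str.strip (PySem.Str.join "\n" (c :: cs'))], []) := by
                unfold pvAStep
                rw [if_pos hcond]
                simp only [hchunk]
                rw [if_neg (by simpa using hne)]
              rw [hstep]
              have := ih (acc ++ [PySem.Str.strip (PySem.Str.join "\n" (c :: cs'))]) [] []
                (by simp) (by simp)
              simp only [List.append_nil, List.nil_append] at this ⊢
              rw [this]
              rw [altParas_run c cs' (x :: L') hcs (Or.inr ⟨x, L', rfl, hx⟩)]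
              simp [altParas, hx]
      · have hstep : pvAStep (acc, bs ++ cs) x = (acc, (bs ++ cs) ++ [x]) := by
          unfold pvAStep
          rw [if_neg (by simp [hx])]
        rw [hstep, List.append_assoc]
        have := ih acc bs (cs ++ [x]) hbs (by
          intro y hy
          rcases List.mem_append.mp hy with h | h
          · exact hcs y h
          · simp at h; subst h; exact hx)
        rw [this]
        simp

-- ===== VERDICT (by name: the statement is the Claim_ definition above) =====
set_option maxHeartbeats 1000000 in
theorem split_aql_queries_spec : Claim_equal_split_aql_queries := by
  intro aql_text _
  unfold Spec_split_aql_queries split_aql_queries split_aql_queries_alt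
  rw [foldl_drop_if, foldl_keep_if]
  simp only [List.nil_append]
  have h := core (PySem.Str.splitlines (PySem.Str.strip (PySem.Str.join "\n"
    (List.filter (fun x => !PySem.Str.startswith (PySem.Str.strip x) "//")
      (PySem.Str.splitlines aql_text))))) [] [] [] (by simp) (by simp)
  simp only [List.nil_append, List.append_nil] at h
  rw [h]
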